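-- pv_equiv track=rewrite | github.com/mattkram/advent-of-code | 2022/src/day08.py | mark_visible
-- ===== SOURCE A (Python) =====
-- def mark_visible(
--     data: list[list[int]], visible: list[list[bool]]
-- ) -> tuple[list[list[int]], list[list[bool]]]:
--     """Mutably mark the visible list by evaluating each row.
--     The data list will come in transposed, reversed, etc.
--     """
--     for i, row in enumerate(data):
--         for j, height in enumerate(row):
--             # Note: all([]) -> True
--             if all(height > v for v in row[:j]):
--                 visible[i][j] = True
--     return data, visible
-- ===== SOURCE B (Python) =====
-- def mark_visible(data, visible):
--     """Single pass per row: keep the running maximum of the heights seen so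
--     far; a cell is visible iff it is strictly taller than that maximum."""
--     for i, row in enumerate(data):
--         best = None
--         for j, h in enumerate(row):
--             if best is None or h > best:
--                 visible[i][j] = True
--                 best = h
--     return data, visible
-- ===== Notes on version B (the rewrite author's own statement) =====
-- stated objective: faster
-- what changed: Replaces the per-cell scan of the whole row prefix (all(height > v for v in row[:j])) by a single pass per row that tracks the running maximum of the heights seen so far.
import Mathlib
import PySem

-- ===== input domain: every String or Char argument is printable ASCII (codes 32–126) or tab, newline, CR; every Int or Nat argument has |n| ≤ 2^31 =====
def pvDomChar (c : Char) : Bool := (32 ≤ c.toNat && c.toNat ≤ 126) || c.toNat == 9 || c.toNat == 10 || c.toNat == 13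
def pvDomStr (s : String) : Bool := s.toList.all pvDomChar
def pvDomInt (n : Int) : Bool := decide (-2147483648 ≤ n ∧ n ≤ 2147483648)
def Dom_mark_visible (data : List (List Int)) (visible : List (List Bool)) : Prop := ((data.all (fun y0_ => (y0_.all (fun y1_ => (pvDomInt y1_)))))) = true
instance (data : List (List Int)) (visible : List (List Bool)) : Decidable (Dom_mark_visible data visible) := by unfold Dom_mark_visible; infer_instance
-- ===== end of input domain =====

-- B replaces A's per-cell rescan of the row prefix by one pass per row tracking the
-- running maximum (asymptotically faster).  Both Pythons mutate `visible` in place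
-- identically; the equivalence proved here is about the return value.

-- `visible[i][j] = True`, totalized: outside Pre_ (where Python raises IndexError) it is a no-op.
def pvSetTrue (v : List (List Bool)) (i j : Int) : List (List Bool) :=
  v.set i.toNat ((v.getD i.toNat []).set j.toNat true)

-- ===== PORT A =====
def mark_visible (data : List (List Int)) (visible : List (List Bool)) : List (List Int) × List (List Bool) :=
  (data,
    (PySem.List.enumerate data 0).foldl (fun v p =>
      (PySem.List.enumerate p.2 0).foldl (fun v q =>
        if (PySem.List.slice p.2 none (some q.1)).all (fun x => decide (q.2 > x)) then
          pvSetTrue v p.1 q.1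
        else v) v) visible)

-- ===== PORT B =====
def mark_visible_alt (data : List (List Int)) (visible : List (List Bool)) : List (List Int) × List (List Bool) :=
  (data,
    (PySem.List.enumerate data 0).foldl (fun v p =>
      ((PySem.List.enumerate p.2 0).foldl (fun (s : Option Int × List (List Bool)) q =>
        if s.1.isNone || decide (q.2 > s.1.getD 0) then (some q.2, pvSetTrue s.2 p.1 q.1)
        else s)
        (none, v)).2) visible)

-- ===== PRECONDITION & SPEC =====
-- Pre_ excludes exactly the inputs on which Python A raises IndexError: some cell that gets
-- marked (strictly taller than every cell before it in its row) has no slot in `visible`.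
def Pre_mark_visible (data : List (List Int)) (visible : List (List Bool)) : Prop :=
  ∀ i < data.length, ∀ j < (data.getD i []).length,
    ((data.getD i []).take j).all (fun x => decide ((data.getD i []).getD j 0 > x)) = true →
      i < visible.length ∧ j < (visible.getD i []).length
instance (data : List (List Int)) (visible : List (List Bool)) : Decidable (Pre_mark_visible data visible) := by unfold Pre_mark_visible; infer_instance
def pvWitness_mark_visible : List (List Int) × List (List Bool) :=
  ([[3, 1, 4], [2, 2]], [[false, false, false], [false, false]])
def Spec_mark_visible (data : List (List Int)) (visible : List (List Bool)) (out : List (List Int) × List (List Bool)) : Prop := out = mark_visible_alt data visible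
instance (data : List (List Int)) (visible : List (List Bool)) (out : List (List Int) × List (List Bool)) : Decidable (Spec_mark_visible data visible out) := by unfold Spec_mark_visible; infer_instance

-- ===== CLAIM (what is proved, stated in full; the proofs are below) =====
def Claim_equal_mark_visible : Prop := ∀ (data : List (List Int)) (visible : List (List Bool)), Dom_mark_visible data visible → Pre_mark_visible data visible → Spec_mark_visible data visible (mark_visible data visible)

-- ===== LEMMAS AND PROOFS =====

-- Inner-loop equivalence: after B has consumed the prefix `pfx` of the row, its running
-- maximum `o` (none iff the prefix is empty, else the prefix's maximum) decides exactly
-- A's condition "strictly taller than everything in the prefix".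
theorem pv_inner (i : Int) (row : List Int) :
    ∀ (rest pfx : List Int), row = pfx ++ rest →
      ∀ (v : List (List Bool)) (o : Option Int),
      (pfx = [] ↔ o = none) →
      (∀ b, o = some b → b ∈ pfx ∧ ∀ x ∈ pfx, x ≤ b) →
      (PySem.List.enumerate rest (pfx.length : Int)).foldl (fun v q =>
          if (PySem.List.slice row none (some q.1)).all (fun x => decide (q.2 > x)) then
            pvSetTrue v i q.1
          else v) v
      = ((PySem.List.enumerate rest (pfx.length : Int)).foldl (fun (s : Option Int × List (List Bool)) q =>
          if s.1.isNone || decide (q.2 > s.1.getD 0) then (some q.2, pvSetTrue s.2 i q.1)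
          else s)
          (o, v)).2 := by
  intro rest
  induction rest with
  | nil => intro pfx _ v o _ _; simp [PySem.List.enumerate]
  | cons h t ih =>
    intro pfx hrow v o hnone hmax
    rw [PySem.List.enumerate_cons, List.foldl_cons, List.foldl_cons]
    have hsl : PySem.List.slice row none (some (pfx.length : Int)) = pfx := by
      rw [hrow, PySem.List.slice_to_natCast]; exact List.take_left
    rw [hsl]
    cases o with
    | none =>
      have hp : pfx = [] := hnone.mpr rfl
      subst hp
      simp only [List.all_nil, if_true, List.length_nil, Int.natCast_zero,
        zero_add]
      have := ih [h] (by simpa using hrow) (pvSetTrue v i 0) (some h)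
        (by simp) (by intro b hb; simp_all)
      simpa using this
    | some b =>
      obtain ⟨hbmem, hble⟩ := hmax b rfl
      have hcond : (pfx.all fun x => decide (h > x)) = decide (h > b) := by
        by_cases hgt : h > b
        · simp only [hgt, decide_true]
          rw [List.all_eq_true]; intro x hx
          exact decide_eq_true (lt_of_le_of_lt (hble x hx) hgt)
        · simp only [hgt, decide_false]
          rw [List.all_eq_false]
          exact ⟨b, hbmem, by simpa using hgt⟩
      rw [hcond]
      by_cases hgt : h > b
      · simp only [hgt, decide_true, if_true]
        have := ih (pfx ++ [h]) (by simpa [List.append_assoc] using hrow)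
          (pvSetTrue v i (pfx.length : Int)) (some h)
          (by simp) (by
            intro c hc
            injection hc with hc; subst hc
            refine ⟨by simp, ?_⟩
            intro x hx
            rcases List.mem_append.mp hx with hx | hx
            · exact le_of_lt (lt_of_le_of_lt (hble x hx) hgt)
            · simp_all)
        simpa [List.append_assoc, hgt] using this
      · simp only [hgt, decide_false]
        have := ih (pfx ++ [h]) (by simpa [List.append_assoc] using hrow) v (some b)
          (by simp) (by
            intro c hc
            injection hc with hc; subst hc
            refine ⟨List.mem_append.mpr (Or.inl hbmem), ?_⟩
            intro x hx
            rcases List.mem_append.mp hx with hx | hx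
            · exact hble x hx
            · simp_all)
        simpa [List.append_assoc, hgt] using this

-- Outer loop: the two per-row bodies agree (apply pv_inner with an empty prefix).
theorem pv_outer :
    ∀ (l : List (Int × List Int)) (v : List (List Bool)),
      l.foldl (fun v p =>
        (PySem.List.enumerate p.2 0).foldl (fun v q =>
          if (PySem.List.slice p.2 none (some q.1)).all (fun x => decide (q.2 > x)) then
            pvSetTrue v p.1 q.1
          else v) v) v
      = l.foldl (fun v p =>
        ((PySem.List.enumerate p.2 0).foldl (fun (s : Option Int × List (List Bool)) q =>
          if s.1.isNone || decide (q.2 > s.1.getD 0) then (some q.2, pvSetTrue s.2 p.1 q.1)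
          else s)
          (none, v)).2) v := by
  intro l
  induction l with
  | nil => intro v; rfl
  | cons p ps ih =>
    intro v
    rw [List.foldl_cons, List.foldl_cons]
    have h2 := pv_inner p.1 p.2 p.2 [] rfl v none (by simp) (by simp)
    simp only [List.length_nil, Int.natCast_zero] at h2
    rw [h2]
    exact ih _

-- ===== VERDICT (by name: the statement is the Claim_ definition above) =====
theorem mark_visible_spec : Claim_equal_mark_visible := by
  intro data visible _ _
  unfold Spec_mark_visible mark_visible mark_visible_alt
  exact Prod.ext rfl (pv_outer (PySem.List.enumerate data 0) visible)
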